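-- pv_equiv track=rewrite | github.com/odylith/odylith | src/odylith/runtime/governance/reconcile_plan_workstream_binding.py | _find_section_bounds
-- ===== SOURCE A (Python) =====
-- def _find_section_bounds(lines: list[str], title: str) -> tuple[int, int]:
--     start = -1
--     for idx, line in enumerate(lines):
--         if line.strip() == title:
--             start = idx
--             break
--     if start == -1:
--         return -1, -1
--     end = len(lines)
--     for idx in range(start + 1, len(lines)):
--         if lines[idx].startswith("## "):
--             end = idx
--             break
--     return start, end
-- ===== SOURCE B (Python) =====
-- def _find_section_bounds(lines: list[str], title: str) -> tuple[int, int]: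
--     start = next((i for i, l in enumerate(lines) if l.strip() == title), -1)
--     if start == -1:
--         return -1, -1
--     headers = [i for i, l in enumerate(lines) if l.startswith("## ")]
--     end = next((h for h in headers if h > start), len(lines))
--     return start, end
-- ===== Notes on version B (the rewrite author's own statement) =====
-- stated objective: alternative
-- what changed: Replaces A's two early-stopping forward scans (break-based title search, then an index loop over range(start+1, len) probing lines[idx]) with a declarative index-table shape: one next() over enumerate for the title, a full-pass header-position table, and a next() lookup for the first header past start.
import Mathlib
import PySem

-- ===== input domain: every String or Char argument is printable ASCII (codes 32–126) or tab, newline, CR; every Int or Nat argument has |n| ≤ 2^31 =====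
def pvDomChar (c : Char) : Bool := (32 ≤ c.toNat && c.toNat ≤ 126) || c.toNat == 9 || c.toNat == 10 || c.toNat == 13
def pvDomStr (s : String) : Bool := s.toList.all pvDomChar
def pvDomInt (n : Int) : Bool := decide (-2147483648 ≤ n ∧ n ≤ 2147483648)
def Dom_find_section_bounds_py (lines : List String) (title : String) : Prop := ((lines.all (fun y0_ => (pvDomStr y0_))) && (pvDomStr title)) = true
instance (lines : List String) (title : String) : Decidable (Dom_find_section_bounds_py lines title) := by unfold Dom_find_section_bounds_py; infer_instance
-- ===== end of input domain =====

-- B replaces A's two early-stopping scans by an index-table decomposition: a find over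
-- enumerate for the title, a full-pass table of header positions, and a lookup for the
-- first header past start; same O(n) cost, different shape.


-- ===== PORT A =====
-- first loop: for idx, line in enumerate(lines): if line.strip() == title: start = idx; break
def loopStartA (title : String) : List (Int × String) → Int
  | [] => -1
  | (i, l) :: rest => if PySem.Str.strip l == title then i else loopStartA title rest

-- second loop: for idx in range(start+1, len(lines)): if lines[idx].startswith("## "): end = idx; break
-- (the index is always in range here, so pyGetD with a default is exact)
def loopEndA (lines : List String) : List Int → Int
  | [] => (lines.length : Int)
  | i :: rest =>
    if PySem.Str.startswith (PySem.List.pyGetD lines i "") "## " then i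
    else loopEndA lines rest

def find_section_bounds_py (lines : List String) (title : String) : Int × Int :=
  let start := loopStartA title (PySem.List.enumerate lines 0)
  if start = -1 then (-1, -1)
  else (start, loopEndA lines (PySem.List.pyRange (start + 1) (lines.length : Int) 1))

-- ===== PORT B =====
def find_section_bounds_py_alt (lines : List String) (title : String) : Int × Int :=
  match (PySem.List.enumerate lines 0).find? (fun p => PySem.Str.strip p.2 == title) with
  | none => (-1, -1)
  | some p =>
    let start := p.1
    let headers := ((PySem.List.enumerate lines 0).filter
        (fun q => PySem.Str.startswith q.2 "## ")).map (·.1)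
    (start, (headers.find? (fun h => start < h)).getD (lines.length : Int))

-- ===== PRECONDITION & SPEC =====
def Spec_find_section_bounds_py (lines : List String) (title : String) (out : Int × Int) : Prop := out = find_section_bounds_py_alt lines title
instance (lines : List String) (title : String) (out : Int × Int) : Decidable (Spec_find_section_bounds_py lines title out) := by unfold Spec_find_section_bounds_py; infer_instance

-- ===== CLAIM (what is proved, stated in full; the proofs are below) =====
def Claim_equal_find_section_bounds_py : Prop := ∀ (lines : List String) (title : String), Dom_find_section_bounds_py lines title → Spec_find_section_bounds_py lines title (find_section_bounds_py lines title)

-- ===== LEMMAS AND PROOFS =====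

-- A's break-loop over enumerate is a find? with default -1
theorem loopStartA_eq (title : String) (ps : List (Int × String)) :
    loopStartA title ps =
      ((ps.find? (fun p => PySem.Str.strip p.2 == title)).map (·.1)).getD (-1) := by
  induction ps with
  | nil => rfl
  | cons p rest ih =>
    obtain ⟨i, l⟩ := p
    simp only [loopStartA, List.find?, ih]
    cases PySem.Str.strip l == title <;> simp

-- A's break-loop over an index list is a find? with default len(lines)
theorem loopEndA_eq (lines : List String) (idxs : List Int) :
    loopEndA lines idxs =
      (idxs.find? (fun i => PySem.Str.startswith (PySem.List.pyGetD lines i "") "## ")).getD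
        (lines.length : Int) := by
  induction idxs with
  | nil => rfl
  | cons i rest ih =>
    simp only [loopEndA, List.find?, ih]
    cases PySem.Str.startswith (PySem.List.pyGetD lines i "") "## " <;> simp

theorem find?_congr' {α : Type} (l : List α) (p q : α → Bool) (h : ∀ x ∈ l, p x = q x) :
    l.find? p = l.find? q := by
  induction l with
  | nil => rfl
  | cons x xs ih =>
    have hx := h x (by simp)
    simp only [List.find?, hx]
    cases q x with
    | true => rfl
    | false => exact ih (fun y hy => h y (by simp [hy]))

theorem find_section_bounds_py_spec : Claim_equal_find_section_bounds_py := by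
  intro lines title _
  unfold Spec_find_section_bounds_py find_section_bounds_py find_section_bounds_py_alt
  cases h : (PySem.List.enumerate lines 0).find? (fun p => PySem.Str.strip p.2 == title) with
  | none => simp [loopStartA_eq, h]
  | some p =>
    have hmem := List.mem_of_find?_eq_some h
    rw [PySem.List.mem_enumerate_iff] at hmem
    obtain ⟨k, hk, hp⟩ := hmem
    subst hp
    simp only [loopStartA_eq, h, Option.map_some, Option.getD_some, zero_add]
    rw [if_neg (by omega)]
    refine Prod.ext rfl ?_
    rw [loopEndA_eq]
    -- B's end: unfold the table lookups into a find? over the index range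
    rw [List.find?_map, List.find?_filter, PySem.List.enumerate_eq_map_pyRange (d := ""),
        List.find?_map]
    simp only [PySem.List.len_eq]
    rw [PySem.List.pyRange_one_append 0 ((k : Int) + 1) (lines.length : Int)
          (by omega) (by exact_mod_cast hk), List.find?_append]
    simp only [Function.comp_def, Bool.decide_and, decide_eq_true_eq]
    have h1 : (List.find?
        (fun x => decide (PySem.Str.startswith (PySem.List.pyGetD lines x "") "## " = true)
          && decide ((k : Int) < x)) (PySem.List.pyRange 0 ((k : Int) + 1))) = none := by
      rw [List.find?_eq_none]
      intro j hj
      rw [PySem.List.mem_pyRange_one] at hj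
      simp only [Bool.and_eq_true, decide_eq_true_eq, not_and]
      intro _
      omega
    rw [h1, Option.none_or]
    have h2 : (List.find?
        (fun x => decide (PySem.Str.startswith (PySem.List.pyGetD lines x "") "## " = true)
          && decide ((k : Int) < x))
        (PySem.List.pyRange ((k : Int) + 1) (lines.length : Int))) =
        List.find? (fun i => PySem.Str.startswith (PySem.List.pyGetD lines i "") "## ")
          (PySem.List.pyRange ((k : Int) + 1) (lines.length : Int)) := by
      apply find?_congr'
      intro j hj
      rw [PySem.List.mem_pyRange_one] at hj
      have hkj : (k : Int) < j := by omega
      simp [hkj]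
    rw [h2]
    cases hf : List.find? (fun i => PySem.Str.startswith (PySem.List.pyGetD lines i "") "## ")
        (PySem.List.pyRange ((k : Int) + 1) (lines.length : Int)) <;>
      simp
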